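-- pv_equiv track=rewrite | github.com/pieterdavid/adventofcode2020 | day06.py | collect_questions
-- ===== SOURCE A (Python) =====
-- from itertools import groupby
--
-- def readGroups(lines):
--     for bV,lnGrp in groupby((ln.strip() for ln in lines), bool):
--         if bV:
--             yield lnGrp
--
-- def collect_questions(inputLines):
--     questions_per_group = []
--     for grp in readGroups(inputLines):
--         sGrp = set()
--         for ln in grp:
--             for c in ln:
--                 sGrp.add(c)
--         questions_per_group.append(sGrp)
--     return questions_per_group
-- ===== SOURCE B (Python) =====
-- def collect_questions(inputLines):
--     questions_per_group = []
--     sGrp = set()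
--     inGroup = False
--     for ln in inputLines:
--         t = ln.strip()
--         if t:
--             for c in t:
--                 sGrp.add(c)
--             inGroup = True
--         elif inGroup:
--             questions_per_group.append(sGrp)
--             sGrp = set()
--             inGroup = False
--     if inGroup:
--         questions_per_group.append(sGrp)
--     return questions_per_group
-- ===== Notes on version B (the rewrite author's own statement) =====
-- stated objective: simpler
-- what changed: Replaces the itertools.groupby generator pipeline (readGroups helper yielding grouped line runs) with a single flat loop over inputLines maintaining a current set and an inGroup flag, flushing on blank lines and after the loop.
import Mathlib
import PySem

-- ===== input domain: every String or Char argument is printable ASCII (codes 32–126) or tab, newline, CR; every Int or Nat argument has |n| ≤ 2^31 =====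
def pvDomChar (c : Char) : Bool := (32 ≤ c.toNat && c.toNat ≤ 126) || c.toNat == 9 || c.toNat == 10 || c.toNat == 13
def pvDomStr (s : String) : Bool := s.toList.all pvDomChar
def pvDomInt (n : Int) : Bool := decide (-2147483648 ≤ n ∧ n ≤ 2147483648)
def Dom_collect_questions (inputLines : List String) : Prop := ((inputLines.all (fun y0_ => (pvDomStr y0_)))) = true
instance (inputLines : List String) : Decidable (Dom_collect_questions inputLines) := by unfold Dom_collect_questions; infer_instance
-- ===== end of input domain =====

-- B is the same task as A written as one flat pass with an explicit (result, current set, inGroup) state,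
-- instead of A's groupby-generator pipeline; objective: simpler, same asymptotic cost.

-- ===== PORT A =====
-- shared inner char loop: 'for c in ln: sGrp.add(c)' (chars are 1-char strings in Python)
def addChars (s : PySem.Set String) (ln : String) : PySem.Set String :=
  ln.toList.foldl (fun s c => PySem.Set.add s (String.ofList [c])) s

-- itertools.groupby(…, bool): runs of consecutive lines with equal truthiness (key = line nonempty)
def groupbyBool : List String → List (Bool × List String)
  | [] => []
  | s :: rest =>
    let k := decide (s.toList ≠ [])
    match groupbyBool rest with
    | (b, g) :: t => if k = b then (k, s :: g) :: t else (k, [s]) :: (b, g) :: t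
    | [] => [(k, [s])]

-- readGroups: groupby over the stripped lines, yielding the groups whose key is truthy
def readGroupsA (lines : List String) : List (List String) :=
  (groupbyBool (lines.map PySem.Str.strip)).filterMap (fun p => if p.1 then some p.2 else none)

def collect_questions (inputLines : List String) : List (List String) :=
  (readGroupsA inputLines).foldl
    (fun questions_per_group grp =>
      questions_per_group ++ [grp.foldl addChars PySem.Set.empty]) []

-- ===== PORT B =====
def stepB (st : List (List String) × PySem.Set String × Bool) (ln : String) :
    List (List String) × PySem.Set String × Bool :=
  let t := PySem.Str.strip ln
  if t.toList ≠ [] then (st.1, addChars st.2.1 t, true)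
  else if st.2.2 then (st.1 ++ [st.2.1], PySem.Set.empty, false)
  else st

def collect_questions_alt (inputLines : List String) : List (List String) :=
  let st := inputLines.foldl stepB ([], PySem.Set.empty, false)
  if st.2.2 then st.1 ++ [st.2.1] else st.1

-- ===== PRECONDITION & SPEC =====
def Spec_collect_questions (inputLines : List String) (out : List (List String)) : Prop := out = collect_questions_alt inputLines
instance (inputLines : List String) (out : List (List String)) : Decidable (Spec_collect_questions inputLines out) := by unfold Spec_collect_questions; infer_instance

-- ===== CLAIM (what is proved, stated in full; the proofs are below) =====
def Claim_equal_collect_questions : Prop := ∀ (inputLines : List String), Dom_collect_questions inputLines → Spec_collect_questions inputLines (collect_questions inputLines)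

-- ===== LEMMAS AND PROOFS =====

-- the set collected from a group, starting from an already accumulated set
def setOfFrom (sg : PySem.Set String) (g : List String) : PySem.Set String := g.foldl addChars sg

def groupsOf (ys : List String) : List (List String) :=
  (groupbyBool ys).filterMap (fun p => if p.1 then some p.2 else none)

def aout (ys : List String) : List (List String) :=
  (groupsOf ys).map (setOfFrom PySem.Set.empty)

-- A's remaining output when B is mid-group with accumulated set sg
def acont (ys : List String) (sg : PySem.Set String) : List (List String) :=
  match groupbyBool ys with
  | (true, g) :: t =>
      setOfFrom sg g ::
        (t.filterMap (fun p => if p.1 then some p.2 else none)).map (setOfFrom PySem.Set.empty)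
  | _ => sg :: aout ys

def finB (st : List (List String) × PySem.Set String × Bool) : List (List String) :=
  if st.2.2 then st.1 ++ [st.2.1] else st.1

lemma stepB_empty_true {res : List (List String)} {sg : PySem.Set String} {s : String}
    (h : (PySem.Str.strip s).toList = []) :
    stepB (res, sg, true) s = (res ++ [sg], PySem.Set.empty, false) := by
  have h' : PySem.Chars.strip s.toList = [] := by simpa using h
  simp [stepB, h']

lemma stepB_empty_false {res : List (List String)} {sg : PySem.Set String} {s : String}
    (h : (PySem.Str.strip s).toList = []) :
    stepB (res, sg, false) s = (res, sg, false) := by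
  have h' : PySem.Chars.strip s.toList = [] := by simpa using h
  simp [stepB, h']

lemma stepB_nonempty {res : List (List String)} {sg : PySem.Set String} {b : Bool} {s : String}
    (h : ¬ (PySem.Str.strip s).toList = []) :
    stepB (res, sg, b) s = (res, addChars sg (PySem.Str.strip s), true) := by
  have h' : ¬ PySem.Chars.strip s.toList = [] := by simpa using h
  simp [stepB, h']

lemma loop_lemma (ys : List String) :
    (∀ res, finB (ys.foldl stepB (res, PySem.Set.empty, false)) = res ++ aout (ys.map PySem.Str.strip))
    ∧ (∀ res sg, finB (ys.foldl stepB (res, sg, true)) = res ++ acont (ys.map PySem.Str.strip) sg) := by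
  induction ys with
  | nil =>
    constructor
    · intro res; simp [finB, aout, groupsOf, groupbyBool]
    · intro res sg; simp [finB, acont, aout, groupsOf, groupbyBool]
  | cons s rest ih =>
    have hF := ih.1
    have hT := ih.2
    constructor
    · intro res
      by_cases h : (PySem.Str.strip s).toList = []
      · -- empty line, not in group: state unchanged
        simp only [List.foldl_cons, stepB_empty_false h]
        rw [hF]
        simp only [List.map_cons, aout, groupsOf, groupbyBool, h, ne_eq, not_true_eq_false,
          decide_false]
        rcases hgb : groupbyBool (rest.map PySem.Str.strip) with _ | ⟨⟨b, g⟩, t⟩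
        · simp
        · cases b <;> simp
      · -- nonempty line: start a group
        simp only [List.foldl_cons, stepB_nonempty h]
        rw [hT]
        simp only [List.map_cons, aout, acont, groupsOf, groupbyBool, h, ne_eq, not_false_eq_true,
          decide_true]
        rcases hgb : groupbyBool (rest.map PySem.Str.strip) with _ | ⟨⟨b, g⟩, t⟩
        · simp [setOfFrom]
        · cases b
          · simp [setOfFrom]
          · simp [setOfFrom]
    · intro res sg
      by_cases h : (PySem.Str.strip s).toList = []
      · -- empty line, in group: flush
        simp only [List.foldl_cons, stepB_empty_true h]
        rw [hF]
        simp only [List.map_cons, acont, aout, groupsOf, groupbyBool, h, ne_eq, not_true_eq_false,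
          decide_false]
        rcases hgb : groupbyBool (rest.map PySem.Str.strip) with _ | ⟨⟨b, g⟩, t⟩
        · simp
        · cases b <;> simp
      · -- nonempty line, in group: keep accumulating
        simp only [List.foldl_cons, stepB_nonempty h]
        rw [hT]
        simp only [List.map_cons, acont, aout, groupsOf, groupbyBool, h, ne_eq, not_false_eq_true,
          decide_true]
        rcases hgb : groupbyBool (rest.map PySem.Str.strip) with _ | ⟨⟨b, g⟩, t⟩
        · simp [setOfFrom]
        · cases b
          · simp [setOfFrom]
          · simp [setOfFrom]

lemma collect_questions_eq_aout (inputLines : List String) :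
    collect_questions inputLines = aout (inputLines.map PySem.Str.strip) := by
  unfold collect_questions readGroupsA aout groupsOf setOfFrom
  rw [PySem.List.foldl_append_singleton_eq_map]
  simp

-- ===== VERDICT (by name: the statement is the Claim_ definition above) =====
theorem collect_questions_spec : Claim_equal_collect_questions := by
  intro inputLines _
  show collect_questions inputLines = collect_questions_alt inputLines
  rw [collect_questions_eq_aout]
  have h := (loop_lemma inputLines).1 []
  rw [List.nil_append] at h
  rw [← h]
  rfl
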